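-- pv_equiv track=rewrite | github.com/imdla/TIL | algorithm/data/1203_피로도_ans.py | solution
-- ===== SOURCE A (Python) =====
-- from itertools import permutations
--
-- def solution(k, dungeons):
--   answer = -1
--
--   for each_case in permutations(dungeons):
--     cnt = 0
--     tmp_k = k
--     for dungeon in each_case:
--       if tmp_k >= dungeon[0]:
--         tmp_k -= dungeon[1]
--         cnt += 1
--       else:
--         break
--     answer = max(answer, cnt)
--
--
--   return answer
-- ===== SOURCE B (Python) =====
-- def solution(k, dungeons):
--     # DFS/backtracking over unused dungeons with pruning, instead of
--     # enumerating all permutations.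
--     def dfs(remk, rem):
--         best = 0
--         for i, d in enumerate(rem):
--             if remk >= d[0]:
--                 r = 1 + dfs(remk - d[1], rem[:i] + rem[i+1:])
--                 if r > best:
--                     best = r
--         return best
--     return dfs(k, list(dungeons))
-- ===== Notes on version B (the rewrite author's own statement) =====
-- stated objective: alternative
-- what changed: Replaces enumeration of all n! permutations with prefix-count and break by a recursive DFS/backtracking over the unused dungeons that only explores feasible orderings and prunes at the first unclearable dungeon.
-- outside the precondition, e.g. on solution(0, [[5], [3, -10]]): A returns 0, B returns 0
import Mathlib
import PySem

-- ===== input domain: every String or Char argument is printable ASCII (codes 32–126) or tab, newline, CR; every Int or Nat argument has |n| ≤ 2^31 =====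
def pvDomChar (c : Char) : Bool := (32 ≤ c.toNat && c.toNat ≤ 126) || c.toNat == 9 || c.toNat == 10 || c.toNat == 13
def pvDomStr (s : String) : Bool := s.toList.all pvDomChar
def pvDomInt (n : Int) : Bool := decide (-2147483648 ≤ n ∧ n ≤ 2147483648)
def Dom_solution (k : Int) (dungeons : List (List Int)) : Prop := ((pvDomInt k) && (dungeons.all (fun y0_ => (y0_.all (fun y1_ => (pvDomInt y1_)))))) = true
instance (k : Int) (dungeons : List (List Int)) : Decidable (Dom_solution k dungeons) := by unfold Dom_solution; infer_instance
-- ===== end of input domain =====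

-- B replaces the n!-permutation enumeration by a pruned DFS over unused dungeons (alternative decomposition).

-- ===== PORT A =====
-- 'each (element, remaining) pick, in order' — the head choices itertools.permutations makes
def picksOf {α : Type} : List α → List (α × List α)
  | [] => []
  | x :: xs => (x, xs) :: (picksOf xs).map (fun p => (p.1, x :: p.2))

-- itertools.permutations(l): choose each head in order, then permute the rest (fuel = length)
def permsA {α : Type} : Nat → List α → List (List α)
  | _, [] => [[]]
  | 0, _ :: _ => [[]]
  | f + 1, x :: xs => (picksOf (x :: xs)).flatMap (fun p => (permsA f p.2).map (fun c => p.1 :: c))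

-- the inner for-loop of A: count cleared prefix, break at the first unclearable dungeon
def runCase (remk : Int) : List (List Int) → Int
  | [] => 0
  | d :: rest =>
    match d with
    | a :: c :: _ => if a ≤ remk then 1 + runCase (remk - c) rest else 0
    | _ => 0

def solution (k : Int) (dungeons : List (List Int)) : Int :=
  (permsA dungeons.length dungeons).foldl (fun answer c => max answer (runCase k c)) (-1)

-- ===== PORT B =====
-- dfs(remk, rem) from Source B: best over every clearable pick, fuel = list length for totality
def dfsAlt : Nat → Int → List (List Int) → Int
  | 0, _, _ => 0
  | f + 1, remk, rem =>
    (picksOf rem).foldl (fun best p =>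
      match p.1 with
      | a :: c :: _ => if a ≤ remk then max best (1 + dfsAlt f (remk - c) p.2) else best
      | _ => best) 0

def solution_alt (k : Int) (dungeons : List (List Int)) : Int :=
  dfsAlt dungeons.length k dungeons

-- ===== PRECONDITION & SPEC =====
-- Pre_ excludes dungeon lists with an entry of fewer than two numbers, except singletons that
-- are provably never clearable (requirement above k and no negative cost anywhere): elsewhere A
-- raises IndexError whenever the short entry becomes clearable, and where it happens never to,
-- A's non-raising return is an accident of the break order.
def Pre_solution (k : Int) (dungeons : List (List Int)) : Prop :=
  ∀ d ∈ dungeons, 2 ≤ d.length ∨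
    (d.length = 1 ∧ k < d.headI ∧ ∀ e ∈ dungeons, 0 ≤ e.getD 1 0)
instance (k : Int) (dungeons : List (List Int)) : Decidable (Pre_solution k dungeons) := by
  unfold Pre_solution; infer_instance

def pvWitness_solution : Int × List (List Int) := (80, [[80, 20], [50, 40], [30, 10]])

def Spec_solution (k : Int) (dungeons : List (List Int)) (out : Int) : Prop := out = solution_alt k dungeons
instance (k : Int) (dungeons : List (List Int)) (out : Int) : Decidable (Spec_solution k dungeons out) := by unfold Spec_solution; infer_instance

-- ===== CLAIM (what is proved, stated in full; the proofs are below) =====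
def Claim_equal_solution : Prop := ∀ (k : Int) (dungeons : List (List Int)), Dom_solution k dungeons → Pre_solution k dungeons → Spec_solution k dungeons (solution k dungeons)

-- ===== LEMMAS AND PROOFS =====

-- the value each pick contributes in B's fold
def stepS (f : Nat) (remk : Int) (p : List Int × List (List Int)) : Int :=
  match p.1 with
  | a :: c :: _ => if a ≤ remk then 1 + dfsAlt f (remk - c) p.2 else 0
  | _ => 0

lemma permsA_ne_nil {α : Type} (f : Nat) (l : List α) : permsA f l ≠ [] := by
  match f, l with
  | _, [] => simp [permsA]
  | 0, _ :: _ => simp [permsA]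
  | f + 1, x :: xs =>
    simp only [permsA, picksOf, List.flatMap_cons]
    intro h
    have h1 := List.append_eq_nil_iff.mp h
    have := permsA_ne_nil f xs
    simp_all

lemma picksOf_mem_length {α : Type} (l : List α) (p : α × List α)
    (h : p ∈ picksOf l) : p.2.length + 1 = l.length := by
  induction l generalizing p with
  | nil => simp [picksOf] at h
  | cons x xs ih =>
    simp only [picksOf, List.mem_cons, List.mem_map] at h
    rcases h with h | ⟨q, hq, rfl⟩
    · subst h; simp
    · have := ih q hq; simp at this ⊢; omega

lemma foldl_flatMap_eq {α β γ : Type} (L : List α) (h : α → List β)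
    (F : γ → β → γ) (b : γ) :
    (L.flatMap h).foldl F b = L.foldl (fun acc x => (h x).foldl F acc) b := by
  induction L generalizing b with
  | nil => rfl
  | cons x xs ih => simp [List.flatMap_cons, List.foldl_append, ih]

lemma foldl_const_max {γ : Type} (xs : List γ) (b o : Int) (hne : xs ≠ []) :
    xs.foldl (fun a _ => max a o) b = max b o := by
  induction xs generalizing b with
  | nil => simp at hne
  | cons x M ih =>
    by_cases hM : M = []
    · subst hM; simp
    · simp only [List.foldl_cons]
      rw [ih (max b o) hM]
      simp only [max_def]; split_ifs <;> omega

lemma le_foldl_step (f : Nat) (remk : Int) (L : List (List Int × List (List Int))) (a : Int) :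
    a ≤ L.foldl (fun best p =>
      match p.1 with
      | a :: c :: _ => if a ≤ remk then max best (1 + dfsAlt f (remk - c) p.2) else best
      | _ => best) a := by
  induction L generalizing a with
  | nil => simp
  | cons p M ih =>
    have h1 : a ≤ (match p.1 with
      | a' :: c :: _ => if a' ≤ remk then max a (1 + dfsAlt f (remk - c) p.2) else a
      | _ => a) := by
      rcases p with ⟨d, rest⟩
      match d with
      | [] => simp
      | [a'] => simp
      | a' :: c :: t => dsimp only; split <;> simp
    calc a ≤ _ := h1
      _ ≤ _ := by exact ih _

lemma dfsAlt_nonneg (f : Nat) (remk : Int) (rem : List (List Int)) :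
    0 ≤ dfsAlt f remk rem := by
  match f with
  | 0 => simp [dfsAlt]
  | f + 1 => exact le_foldl_step f remk _ 0

lemma stepS_nonneg (f : Nat) (remk : Int) (p : List Int × List (List Int)) :
    0 ≤ stepS f remk p := by
  rcases p with ⟨d, rest⟩
  match d with
  | [] => simp [stepS]
  | [a] => simp [stepS]
  | a :: c :: t =>
    simp only [stepS]; split
    · have := dfsAlt_nonneg f (remk - c) rest; omega
    · omega

-- shift a constant offset out of a running max over a nonempty list of nonnegatives
lemma foldl_max_shift {γ : Type} (s : γ → Int) :
    ∀ (L : List γ), (∀ p ∈ L, 0 ≤ s p) → L ≠ [] → ∀ (o b : Int),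
    L.foldl (fun a p => max a (o + s p)) b =
      max b (o + L.foldl (fun a p => max a (s p)) 0) := by
  intro L
  induction L with
  | nil => intro _ h; simp at h
  | cons p M ih =>
    intro hs _ o b
    have hp0 : 0 ≤ s p := hs p (by simp)
    by_cases hM : M = []
    · subst hM
      simp only [List.foldl_cons, List.foldl_nil]
      simp only [max_def]; split_ifs <;> omega
    · have hsM : ∀ q ∈ M, 0 ≤ s q := fun q hq => hs q (List.mem_cons_of_mem _ hq)
      have hL := ih hsM hM o (max b (o + s p))
      have hR : M.foldl (fun a p => max a (s p)) (max 0 (s p)) =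
          max (max 0 (s p)) (M.foldl (fun a p => max a (s p)) 0) := by
        have := ih hsM hM 0 (max 0 (s p))
        simpa using this
      simp only [List.foldl_cons]
      rw [hL, hR]
      simp only [max_def]; split_ifs <;> omega

-- B's fold skips unclearable picks; with a nonnegative accumulator that equals max with stepS
lemma dfs_fold_eq (f : Nat) (remk : Int) :
    ∀ (L : List (List Int × List (List Int))) (a : Int), 0 ≤ a →
    L.foldl (fun best p =>
      match p.1 with
      | a :: c :: _ => if a ≤ remk then max best (1 + dfsAlt f (remk - c) p.2) else best
      | _ => best) a = L.foldl (fun a p => max a (stepS f remk p)) a := by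
  intro L
  induction L with
  | nil => intro a _; rfl
  | cons p M ih =>
    intro a ha
    rcases p with ⟨d, rest⟩
    have h2 : (match d with
        | a' :: c :: _ => if a' ≤ remk then max a (1 + dfsAlt f (remk - c) rest) else a
        | _ => a) = max a (stepS f remk (d, rest)) := by
      match d with
      | [] => simp only [stepS]; exact (max_eq_left ha).symm
      | [x] => simp only [stepS]; exact (max_eq_left ha).symm
      | x :: c :: t =>
        simp only [stepS]
        split
        · rfl
        · exact (max_eq_left ha).symm
    simp only [List.foldl_cons]
    rw [h2]
    exact ih _ (le_trans ha (le_max_left _ _))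

-- the main invariant: a running max (with offset o) of A's prefix-count over all
-- permutations of rem equals B's DFS value
lemma main_lemma : ∀ (f : Nat) (rem : List (List Int)), rem.length ≤ f →
    ∀ (remk o b : Int),
    (permsA f rem).foldl (fun a c => max a (o + runCase remk c)) b =
      max b (o + dfsAlt f remk rem) := by
  intro f
  induction f with
  | zero =>
    intro rem hlen remk o b
    have : rem = [] := List.length_eq_zero_iff.mp (Nat.le_zero.mp hlen)
    subst this
    simp [permsA, runCase, dfsAlt]
  | succ f ih =>
    intro rem hlen remk o b
    match rem with
    | [] => simp [permsA, runCase, dfsAlt, picksOf]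
    | x :: xs =>
      have hpick : ∀ p ∈ picksOf (x :: xs), p.2.length ≤ f := by
        intro p hp
        have := picksOf_mem_length (x :: xs) p hp
        simp at this hlen ⊢; omega
      show (permsA (f + 1) (x :: xs)).foldl _ b = _
      rw [show permsA (f + 1) (x :: xs) =
          (picksOf (x :: xs)).flatMap (fun p => (permsA f p.2).map (fun c => p.1 :: c)) from rfl]
      rw [foldl_flatMap_eq]
      -- pointwise: each pick's inner fold is a single max with stepS
      have hinner : ∀ (a : Int) (p : List Int × List (List Int)), p ∈ picksOf (x :: xs) →
          ((permsA f p.2).map (fun c => p.1 :: c)).foldl (fun a c => max a (o + runCase remk c)) a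
            = max a (o + stepS f remk p) := by
        intro a p hp
        rw [List.foldl_map]
        rcases p with ⟨d, rest⟩
        match d with
        | [] =>
          simp only [runCase, stepS]
          exact foldl_const_max _ _ _ (permsA_ne_nil f rest)
        | [y] =>
          simp only [runCase, stepS]
          exact foldl_const_max _ _ _ (permsA_ne_nil f rest)
        | y :: c :: t =>
          simp only [runCase, stepS]
          by_cases hy : y ≤ remk
          · simp only [if_pos hy]
            calc (permsA f rest).foldl (fun a cs => max a (o + (1 + runCase (remk - c) cs))) a
                = (permsA f rest).foldl (fun a cs => max a ((o + 1) + runCase (remk - c) cs)) a := by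
                  exact PySem.List.foldl_congr_mem _ _ _ _
                    (fun acc cs _ => by rw [show o + (1 + runCase (remk - c) cs) = (o + 1) + runCase (remk - c) cs from by ring])
              _ = max a ((o + 1) + dfsAlt f (remk - c) rest) :=
                  ih rest (hpick (y :: c :: t, rest) hp) (remk - c) (o + 1) a
              _ = max a (o + (1 + dfsAlt f (remk - c) rest)) := by
                  rw [show (o + 1) + dfsAlt f (remk - c) rest = o + (1 + dfsAlt f (remk - c) rest) from by ring]
          · simp only [if_neg hy]
            exact foldl_const_max _ _ _ (permsA_ne_nil f rest)
      have hcong : (picksOf (x :: xs)).foldl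
            (fun acc p => ((permsA f p.2).map (fun c => p.1 :: c)).foldl (fun a c => max a (o + runCase remk c)) acc) b
          = (picksOf (x :: xs)).foldl (fun a p => max a (o + stepS f remk p)) b :=
        PySem.List.foldl_congr_mem _ _ _ _ (fun acc p hp => hinner acc p hp)
      rw [hcong]
      rw [foldl_max_shift (stepS f remk) _ (fun p _ => stepS_nonneg f remk p) (by simp [picksOf]) o b]
      congr 2
      show _ = dfsAlt (f + 1) remk (x :: xs)
      rw [show dfsAlt (f + 1) remk (x :: xs) =
        (picksOf (x :: xs)).foldl (fun best p =>
          match p.1 with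
          | a :: c :: _ => if a ≤ remk then max best (1 + dfsAlt f (remk - c) p.2) else best
          | _ => best) 0 from rfl]
      exact (dfs_fold_eq f remk _ 0 le_rfl).symm

-- ===== VERDICT (by name: the statement is the Claim_ definition above) =====
theorem solution_spec : Claim_equal_solution := by
  intro k dungeons _ _
  show solution k dungeons = solution_alt k dungeons
  unfold solution solution_alt
  have h := main_lemma dungeons.length dungeons le_rfl k 0 (-1)
  have hpos := dfsAlt_nonneg dungeons.length k dungeons
  have hcong : (permsA dungeons.length dungeons).foldl (fun answer c => max answer (runCase k c)) (-1)
      = (permsA dungeons.length dungeons).foldl (fun a c => max a (0 + runCase k c)) (-1) :=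
    PySem.List.foldl_congr_mem _ _ _ _ (fun acc c _ => by rw [zero_add])
  rw [hcong, h, zero_add, max_eq_right (by omega : (-1 : Int) ≤ dfsAlt dungeons.length k dungeons)]
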